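-- pv_equiv track=rewrite | github.com/ikudjoi/advent-of-code | 2023/03/d3.py | is_engine_part
-- ===== SOURCE A (Python) =====
-- def is_engine_part(ls, y, x1, x2):
--     u_min, u_max = y-1, y+1
--     v_min, v_max = x1-1, x2+1
--     for u in range(u_min, u_max+1):
--         for v in range(v_min, v_max+1):
--             # Skip inside
--             if u not in (u_min, u_max) and v not in (v_min, v_max):
--                 continue
--
--             # I'm relying on IndexError too by Python has special handling for neg indices
--             if u < 0 or v < 0:
--                 continue
--
--             try:
--                 c = ls[u][v]
--             except IndexError:
--                 continue
--             if c != ".":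
--                 return True
--
--     return False
-- ===== SOURCE B (Python) =====
-- def is_engine_part(ls, y, x1, x2):
--     # Inverted scan: iterate the characters present in the (clamped) neighbouring
--     # rows and test each symbol's coordinates against the number's span.
--     lo, hi = x1 - 1, x2 + 1
--     for u in range(max(y - 1, 0), min(y + 2, len(ls))):
--         for v, c in enumerate(ls[u]):
--             if c == ".":
--                 continue
--             if v < lo or v > hi:
--                 continue
--             if u == y and lo < v < hi:
--                 continue
--             return True
--     return False
-- ===== Notes on version B (the rewrite author's own statement) =====
-- stated objective: alternative
-- what changed: Inverts the iteration: instead of enumerating border coordinates and probing the grid with negative-index guards and try/except IndexError, B clamps the row window into the grid once and enumerates the characters actually present in those rows, testing each symbol's coordinates against the number's span.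
import Mathlib
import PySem

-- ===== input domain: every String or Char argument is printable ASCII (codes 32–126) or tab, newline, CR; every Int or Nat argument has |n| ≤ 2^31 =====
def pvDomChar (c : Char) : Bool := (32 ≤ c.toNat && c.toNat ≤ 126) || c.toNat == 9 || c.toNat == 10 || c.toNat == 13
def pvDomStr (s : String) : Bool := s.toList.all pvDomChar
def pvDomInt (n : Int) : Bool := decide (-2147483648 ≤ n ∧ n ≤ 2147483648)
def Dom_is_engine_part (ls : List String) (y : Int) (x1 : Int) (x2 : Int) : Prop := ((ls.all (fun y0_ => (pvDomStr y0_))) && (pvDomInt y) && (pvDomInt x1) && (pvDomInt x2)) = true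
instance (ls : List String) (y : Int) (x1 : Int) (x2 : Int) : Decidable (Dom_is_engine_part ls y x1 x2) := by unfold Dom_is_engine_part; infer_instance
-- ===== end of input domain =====

-- B inverts the iteration: instead of enumerating border coordinates and probing the grid with
-- negative-index guards and try/except, it clamps the row window into the grid and enumerates the
-- characters actually present, testing each symbol's coordinates against the span (same cost).

-- ===== PORT A =====
-- literal transliteration of A's nested for-loops; interior-skip `continue`, negative-index skip
-- and the IndexError catch (pyGet? = none) stay in branch order
def is_engine_part (ls : List String) (y : Int) (x1 : Int) (x2 : Int) : Bool :=
  let uMin := y - 1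
  let uMax := y + 1
  let vMin := x1 - 1
  let vMax := x2 + 1
  (PySem.List.pyRange uMin (uMax + 1) 1).any fun u =>
    (PySem.List.pyRange vMin (vMax + 1) 1).any fun v =>
      if (u ≠ uMin ∧ u ≠ uMax) ∧ (v ≠ vMin ∧ v ≠ vMax) then false
      else if u < 0 ∨ v < 0 then false
      else
        match PySem.List.pyGet? ls u with
        | none => false
        | some row =>
          match PySem.Str.pyGet? row v with
          | none => false
          | some c => decide (c ≠ '.')

-- ===== PORT B =====
-- transliteration of Source B: rows clamped into the grid, characters via enumerate, coordinate tests
def is_engine_part_alt (ls : List String) (y : Int) (x1 : Int) (x2 : Int) : Bool :=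
  let lo := x1 - 1
  let hi := x2 + 1
  (PySem.List.pyRange (max (y - 1) 0) (min (y + 2) (ls.length : Int)) 1).any fun u =>
    match PySem.List.pyGet? ls u with   -- ls[u]; u is in range by the loop bounds
    | none => false
    | some row =>
      (PySem.List.enumerate row.toList 0).any fun vc =>
        if vc.2 == '.' then false
        else if vc.1 < lo ∨ vc.1 > hi then false
        else if u == y ∧ lo < vc.1 ∧ vc.1 < hi then false
        else true

-- ===== PRECONDITION & SPEC =====
def Spec_is_engine_part (ls : List String) (y : Int) (x1 : Int) (x2 : Int) (out : Bool) : Prop := out = is_engine_part_alt ls y x1 x2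
instance (ls : List String) (y : Int) (x1 : Int) (x2 : Int) (out : Bool) : Decidable (Spec_is_engine_part ls y x1 x2 out) := by unfold Spec_is_engine_part; infer_instance

-- ===== CLAIM (what is proved, stated in full; the proofs are below) =====
def Claim_equal_is_engine_part : Prop := ∀ (ls : List String) (y : Int) (x1 : Int) (x2 : Int), Dom_is_engine_part ls y x1 x2 → Spec_is_engine_part ls y x1 x2 (is_engine_part ls y x1 x2)

-- ===== LEMMAS AND PROOFS =====

theorem is_engine_part_eq_alt (ls : List String) (y x1 x2 : Int) :
    is_engine_part ls y x1 x2 = is_engine_part_alt ls y x1 x2 := by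
  rw [Bool.eq_iff_iff]
  simp only [is_engine_part, is_engine_part_alt, List.any_eq_true,
    PySem.List.mem_pyRange_one]
  constructor
  · rintro ⟨u, ⟨hu1, hu2⟩, v, ⟨hv1, hv2⟩, hbody⟩
    by_cases hskip : (u ≠ y - 1 ∧ u ≠ y + 1) ∧ (v ≠ x1 - 1 ∧ v ≠ x2 + 1)
    · rw [if_pos hskip] at hbody; exact absurd hbody (by simp)
    rw [if_neg hskip] at hbody
    by_cases hneg : u < 0 ∨ v < 0
    · rw [if_pos hneg] at hbody; exact absurd hbody (by simp)
    rw [if_neg hneg] at hbody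
    push Not at hneg
    obtain ⟨hu0, hv0⟩ := hneg
    cases hrow : PySem.List.pyGet? ls u with
    | none => rw [hrow] at hbody; exact absurd hbody (by simp)
    | some row =>
      rw [hrow] at hbody
      dsimp only at hbody
      cases hc : PySem.Str.pyGet? row v with
      | none => rw [hc] at hbody; exact absurd hbody (by simp)
      | some c =>
        rw [hc] at hbody
        have hcne : c ≠ '.' := by simpa using hbody
        have hget : ls[u.toNat]? = some row := by
          have h0 := hrow; rw [PySem.List.pyGet?_of_nonneg _ hu0] at h0; exact h0
        have hulen : u.toNat < ls.length := by
          by_contra h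
          simp [List.getElem?_eq_none (Nat.le_of_not_lt h)] at hget
        have hcv : row.toList[v.toNat]? = some c := by
          have h' := hc
          simp only [PySem.Str.pyGet?_eq, PySem.Chars.pyGet?_eq_listPyGet?] at h'
          rw [PySem.List.pyGet?_of_nonneg _ hv0] at h'; exact h'
        have hvlen : v.toNat < row.toList.length := by
          by_contra h
          simp [List.getElem?_eq_none (Nat.le_of_not_lt h)] at hcv
        refine ⟨u, ⟨by omega, by omega⟩, ?_⟩
        rw [hrow]
        dsimp only
        simp only [List.any_eq_true, PySem.List.mem_enumerate_iff]
        refine ⟨((0 : Int) + v.toNat, row.toList[v.toNat]), ⟨v.toNat, hvlen, rfl⟩, ?_⟩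
        have hcc : row.toList[v.toNat] = c := by
          have h2 := List.getElem?_eq_getElem hvlen
          rw [hcv] at h2; exact (Option.some.inj h2).symm
        have hvv : ((0 : Int) + (v.toNat : Int)) = v := by omega
        dsimp only
        rw [hcc, hvv, if_neg (by simpa using hcne)]
        rw [if_neg (by omega)]
        have hn : ¬ ((u == y) = true ∧ x1 - 1 < v ∧ v < x2 + 1) := by
          intro h
          simp only [beq_iff_eq] at h
          obtain ⟨huy, hl, hh⟩ := h
          exact hskip ⟨⟨by omega, by omega⟩, ⟨by omega, by omega⟩⟩
        rw [if_neg hn]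
  · rintro ⟨u, ⟨hu1, hu2⟩, hbody⟩
    cases hrow : PySem.List.pyGet? ls u with
    | none => rw [hrow] at hbody; exact absurd hbody (by simp)
    | some row =>
      rw [hrow] at hbody
      dsimp only at hbody
      simp only [List.any_eq_true, PySem.List.mem_enumerate_iff] at hbody
      obtain ⟨vc, ⟨k, hk, hvc⟩, hcond⟩ := hbody
      subst hvc
      simp only [zero_add] at hcond
      by_cases h1 : row.toList[k] == '.'
      · rw [if_pos h1] at hcond; exact absurd hcond (by simp)
      rw [if_neg h1] at hcond
      by_cases h2 : (k : Int) < x1 - 1 ∨ (k : Int) > x2 + 1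
      · rw [if_pos h2] at hcond; exact absurd hcond (by simp)
      rw [if_neg h2] at hcond
      by_cases h3 : u == y ∧ x1 - 1 < (k : Int) ∧ (k : Int) < x2 + 1
      · rw [if_pos h3] at hcond; exact absurd hcond (by simp)
      push Not at h2
      have hu0 : 0 ≤ u := le_trans (le_max_right _ _) hu1
      have hulen : u < (ls.length : Int) := lt_of_lt_of_le hu2 (min_le_right _ _)
      have huy1 : y - 1 ≤ u := le_trans (le_max_left _ _) hu1
      have huy2 : u < y + 2 := lt_of_lt_of_le hu2 (min_le_left _ _)
      refine ⟨u, ⟨by omega, by omega⟩, (k : Int), ⟨by omega, by omega⟩, ?_⟩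
      have hskipA : ¬ ((u ≠ y - 1 ∧ u ≠ y + 1) ∧ ((k:Int) ≠ x1 - 1 ∧ (k:Int) ≠ x2 + 1)) := by
        intro h
        apply h3
        simp only [beq_iff_eq]
        exact ⟨by omega, by omega, by omega⟩
      rw [if_neg hskipA, if_neg (by omega)]
      rw [hrow]
      dsimp only
      have hc : PySem.Str.pyGet? row (k : Int) = some row.toList[k] := by
        simp only [PySem.Str.pyGet?_eq, PySem.Chars.pyGet?_eq_listPyGet?,
          PySem.List.pyGet?_natCast]
        exact List.getElem?_eq_getElem hk
      rw [hc]
      simpa using h1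

-- ===== VERDICT (by name: the statement is the Claim_ definition above) =====
theorem is_engine_part_spec : Claim_equal_is_engine_part := by
  intro ls y x1 x2 _
  exact (is_engine_part_eq_alt ls y x1 x2).symm ▸ rfl
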